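-- pv_equiv track=rewrite | github.com/jaytula/python-wars | single_character_palindromes_ii.py | solve
-- ===== SOURCE A (Python) =====
-- import math
--
-- def solve(s: str):
--   if len(s) % 2 == 0 and s == s[::-1]: return False
--   if len(s) % 2 == 1 and s == s[::-1]: return True
--
--   diff_count = 0
--   max_index = math.floor(len(s) / 2)
--   for idx, ch in enumerate(s[:max_index]):
--     if ch != s[-(idx+1)]: diff_count += 1
--
--   return diff_count == 1
-- ===== SOURCE B (Python) =====
-- def solve(s: str):
--     n = len(s)
--     i, j = 0, n - 1
--     while i < j and s[i] == s[j]: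
--         i += 1
--         j -= 1
--     if i >= j:
--         return n % 2 == 1
--     t = list(s)
--     t[i] = t[j]
--     return t == t[::-1]
-- ===== Notes on version B (the rewrite author's own statement) =====
-- stated objective: alternative
-- what changed: A compares s with its full reversal twice and then counts all first-half mismatches against negative indexing; B walks two pointers inward only to the FIRST mismatch (no reversal, no counting): if none it returns the length parity, otherwise it repairs that one position (t[i] = t[j]) and returns whether the repaired string is a palindrome.
import Mathlib
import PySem

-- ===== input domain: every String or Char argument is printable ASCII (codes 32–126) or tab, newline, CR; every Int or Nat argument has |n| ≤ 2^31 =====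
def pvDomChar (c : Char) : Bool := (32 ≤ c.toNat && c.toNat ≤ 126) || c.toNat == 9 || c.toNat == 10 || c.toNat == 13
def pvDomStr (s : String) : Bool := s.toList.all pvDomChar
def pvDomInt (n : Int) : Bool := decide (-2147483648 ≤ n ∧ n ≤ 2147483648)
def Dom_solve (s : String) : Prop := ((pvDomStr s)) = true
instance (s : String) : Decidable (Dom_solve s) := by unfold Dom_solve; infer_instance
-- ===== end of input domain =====

-- B replaces A's two full-reversal comparisons and first-half mismatch count by an
-- early-exit two-pointer scan to the first mismatch, which is then repaired and the
-- repaired string tested for palindromicity (alternative decomposition, same cost).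

-- ===== PORT A =====
-- literal port of A: two palindrome checks via s[::-1], then a half-length loop
-- over enumerate(s[:max_index]) comparing against s[-(idx+1)] (pyGet? with a
-- negative index; 'some ch ≠ pyGet? …' is Python's ch != s[-(idx+1)], which never
-- raises here since idx+1 ≤ len(s)).
def solve (s : String) : Bool :=
  let cs := s.toList
  if cs.length % 2 == 0 && (some cs == PySem.List.slice? cs none none (-1)) then false
  else if cs.length % 2 == 1 && (some cs == PySem.List.slice? cs none none (-1)) then true
  else
    let maxIndex : Nat := cs.length / 2
    let diff : Int := (PySem.List.enumerate (PySem.List.slice cs none (some (maxIndex : Int))) 0).foldl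
      (fun d p => if some p.2 ≠ PySem.List.pyGet? cs (-(p.1 + 1)) then d + 1 else d) 0
    decide (diff = 1)

-- ===== PORT B =====
-- Source B's while loop 'while i < j and s[i] == s[j]: i += 1; j -= 1' as structural
-- recursion on the same state (i, j); pyGet? is s[i]/s[j], which never raises while
-- the guard i < j holds (0 ≤ i < j ≤ len-1).
def scanB (cs : List Char) (i : Nat) (j : Int) : Nat × Int :=
  if h : (i : Int) < j ∧ PySem.List.pyGet? cs (i : Int) = PySem.List.pyGet? cs j then
    scanB cs (i + 1) (j - 1)
  else (i, j)
termination_by (j - (i : Int)).toNat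
decreasing_by omega

-- port of Source B: scan to the first mismatch; if the pointers met, return the parity;
-- otherwise repair t[i] = t[j] (index j is in range 0 ≤ i < j < len here, so getD is
-- exact) and test 't == t[::-1]' (list reversal, PySem.List.slice?_none_none_neg_one).
def solve_alt (s : String) : Bool :=
  let cs := s.toList
  let n := cs.length
  let p := scanB cs 0 ((n : Int) - 1)
  if (p.1 : Int) ≥ p.2 then n % 2 == 1
  else
    let t := cs.set p.1 (cs.getD p.2.toNat 'x')
    t == t.reverse

-- ===== PRECONDITION & SPEC =====
def Spec_solve (s : String) (out : Bool) : Prop := out = solve_alt s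
instance (s : String) (out : Bool) : Decidable (Spec_solve s out) := by unfold Spec_solve; infer_instance

-- ===== CLAIM (what is proved, stated in full; the proofs are below) =====
def Claim_equal_solve : Prop := ∀ (s : String), Dom_solve s → Spec_solve s (solve s)

-- ===== LEMMAS AND PROOFS =====

-- the common reference: number of mismatched first-half pairs
def cnt (cs : List Char) : Nat :=
  (List.range (cs.length / 2)).countP
    (fun k => cs.getD k 'x' != cs.getD (cs.length - 1 - k) 'x')

theorem foldl_count_aux (l : List (Int × Char)) (f : Int × Char → Prop) [DecidablePred f] (acc : Int) :
    l.foldl (fun d p => if f p then d + 1 else d) acc = acc + (l.countP (fun p => decide (f p))) := by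
  induction l generalizing acc with
  | nil => simp
  | cons x xs ih =>
    by_cases h : f x <;>
      simp [List.foldl_cons, ih, h, Int.add_comm, Int.add_assoc]

theorem enum_take_eq (cs : List Char) :
    PySem.List.enumerate (cs.take (cs.length / 2)) 0 =
      (List.range (cs.length / 2)).map (fun (k : Nat) => ((k : Int), cs.getD k 'x')) := by
  have hle : cs.length / 2 ≤ cs.length := Nat.div_le_self _ _
  apply List.ext_getElem
  · simp [PySem.List.length_enumerate, Nat.min_eq_left hle]
  · intro i h1 h2
    simp [PySem.List.length_enumerate, Nat.min_eq_left hle] at h1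
    simp [PySem.List.getElem_enumerate, Nat.lt_of_lt_of_le h1 hle]

theorem countA_eq (cs : List Char) :
    (PySem.List.enumerate (cs.take (cs.length / 2)) 0).countP
        (fun p => decide (some p.2 ≠ PySem.List.pyGet? cs (-(p.1 + 1)))) = cnt cs := by
  rw [enum_take_eq, cnt, List.countP_map]
  apply List.countP_congr
  intro k hk
  simp only [List.mem_range] at hk
  have h2 : k + 1 ≤ cs.length := by omega
  have hlt : cs.length - (k + 1) < cs.length := by omega
  have hk' : k < cs.length := by omega
  have hg' : PySem.List.pyGet? cs (-1 + -(k : Int)) = some cs[cs.length - (k + 1)] := by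
    rw [show (-1 + -(k : Int)) = -(((k + 1 : Nat) : Int)) by push_cast; ring]
    rw [PySem.List.pyGet?_neg_natCast cs (k + 1) (by omega) h2, List.getElem?_eq_getElem hlt]
  simp [Function.comp, hg', hk', hlt,
    show cs.length - 1 - k = cs.length - (k + 1) by omega, bne]

theorem pal_iff (cs : List Char) :
    cs.reverse = cs ↔
      ∀ k < cs.length / 2, cs.getD k 'x' = cs.getD (cs.length - 1 - k) 'x' := by
  constructor
  · intro hp k hk
    have hk' : k < cs.length := by omega
    have hlt : cs.length - 1 - k < cs.length := by omega
    have h := congrArg (fun l => l[k]?) hp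
    simp only [List.getElem?_reverse hk'] at h
    rw [List.getElem?_eq_getElem hk', List.getElem?_eq_getElem hlt] at h
    rw [List.getD_eq_getElem _ _ hk', List.getD_eq_getElem _ _ hlt]
    exact (Option.some_injective _ h).symm
  · intro hsym
    have key : ∀ k, k < cs.length / 2 → cs[k]? = cs[cs.length - 1 - k]? := by
      intro k hk
      have hk' : k < cs.length := by omega
      have hlt : cs.length - 1 - k < cs.length := by omega
      have h := hsym k hk
      rw [List.getD_eq_getElem _ _ hk', List.getD_eq_getElem _ _ hlt] at h
      rw [List.getElem?_eq_getElem hk', List.getElem?_eq_getElem hlt, h]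
    apply List.ext_getElem?
    intro i
    by_cases hi : i < cs.length
    · rw [List.getElem?_reverse hi]
      by_cases hc : i < cs.length / 2
      · exact (key i hc).symm
      · by_cases hc2 : cs.length - 1 - i < cs.length / 2
        · have h := key _ hc2
          rw [show cs.length - 1 - (cs.length - 1 - i) = i by omega] at h
          exact h
        · rw [show cs.length - 1 - i = i by omega]
    · have hi1 : cs.length ≤ i := by omega
      rw [List.getElem?_eq_none (by simpa using hi1), List.getElem?_eq_none hi1]

-- A computes: palindrome ⇒ parity, otherwise cnt = 1
theorem solveA_char (s : String) :
    solve s = (if (s.toList).reverse = s.toList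
               then decide ((s.toList).length % 2 = 1) else decide (cnt (s.toList) = 1)) := by
  unfold solve
  simp only [PySem.List.slice?_none_none_neg_one]
  set cs := s.toList with hcs
  have hfold : (PySem.List.enumerate (PySem.List.slice cs none (some ((cs.length / 2 : Nat) : Int))) 0).foldl
      (fun d p => if some p.2 ≠ PySem.List.pyGet? cs (-(p.1 + 1)) then d + 1 else d) 0
      = (cnt cs : Int) := by
    rw [PySem.List.slice_to_natCast,
      foldl_count_aux _ (fun p => some p.2 ≠ PySem.List.pyGet? cs (-(p.1 + 1))) 0, countA_eq]
    simp
  by_cases hpal : cs.reverse = cs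
  · by_cases hpar : cs.length % 2 = 0 <;>
      simp [hpal, hpar] <;> omega
  · have hpal' : ¬ cs = cs.reverse := fun h => hpal h.symm
    simp only [hfold]
    have h1 : ((cnt cs : Int) = 1) ↔ (cnt cs = 1) := by exact_mod_cast Iff.rfl
    simp [hpal, hpal', h1]

-- ===== scan characterisation =====

theorem scan_all (cs : List Char) : ∀ (m i : Nat), cs.length - i ≤ m →
    (∀ k, i ≤ k → k < cs.length / 2 → cs.getD k 'x' = cs.getD (cs.length - 1 - k) 'x') →
    ((scanB cs i ((cs.length : Int) - 1 - i)).1 : Int) ≥ (scanB cs i ((cs.length : Int) - 1 - i)).2 := by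
  intro m
  induction m with
  | zero =>
    intro i hm _
    have hi : cs.length ≤ i := by omega
    rw [scanB]
    have : ¬ ((i : Int) < (cs.length : Int) - 1 - i ∧
        PySem.List.pyGet? cs (i : Int) = PySem.List.pyGet? cs ((cs.length : Int) - 1 - i)) := by
      rintro ⟨h1, _⟩; omega
    simp only [this, dite_false]
    omega
  | succ m ih =>
    intro i hm hmatch
    rw [scanB]
    by_cases hg : (i : Int) < (cs.length : Int) - 1 - i ∧
        PySem.List.pyGet? cs (i : Int) = PySem.List.pyGet? cs ((cs.length : Int) - 1 - i)
    · simp only [hg]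
      have hrec : ((cs.length : Int) - 1 - i) - 1 = (cs.length : Int) - 1 - (i + 1 : Nat) := by
        push_cast; ring
      rw [hrec]
      have hi : i < cs.length := by omega
      exact ih (i + 1) (by omega) (fun k hk1 hk2 => hmatch k (by omega) hk2)
    · simp only [hg, dite_false]
      by_contra hlt
      apply hg
      have h1 : (i : Int) < (cs.length : Int) - 1 - i := by omega
      refine ⟨h1, ?_⟩
      have hi2 : i < cs.length / 2 := by omega
      have hi : i < cs.length := by omega
      have hj : cs.length - 1 - i < cs.length := by omega
      have heq := hmatch i (le_refl _) hi2
      rw [List.getD_eq_getElem _ _ hi, List.getD_eq_getElem _ _ hj] at heq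
      rw [PySem.List.pyGet?_natCast,
        show ((cs.length : Int) - 1 - i) = (((cs.length - 1 - i : Nat) : Int)) by omega,
        PySem.List.pyGet?_natCast, List.getElem?_eq_getElem hi, List.getElem?_eq_getElem hj, heq]

theorem scan_first (cs : List Char) (k0 : Nat) (hk0 : k0 < cs.length / 2)
    (hmis : cs.getD k0 'x' ≠ cs.getD (cs.length - 1 - k0) 'x') :
    ∀ (m i : Nat), k0 - i ≤ m → i ≤ k0 →
    (∀ k, i ≤ k → k < k0 → cs.getD k 'x' = cs.getD (cs.length - 1 - k) 'x') →
    scanB cs i ((cs.length : Int) - 1 - i) = (k0, (cs.length : Int) - 1 - k0) := by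
  have hn : 2 * k0 + 2 ≤ cs.length := by omega
  intro m
  induction m with
  | zero =>
    intro i hm hik _
    have hi : i = k0 := by omega
    subst hi
    rw [scanB]
    have hne : ¬ ((i : Int) < (cs.length : Int) - 1 - i ∧
        PySem.List.pyGet? cs (i : Int) = PySem.List.pyGet? cs ((cs.length : Int) - 1 - i)) := by
      rintro ⟨_, h2⟩
      apply hmis
      have hi : i < cs.length := by omega
      have hj : cs.length - 1 - i < cs.length := by omega
      rw [PySem.List.pyGet?_natCast,
        show ((cs.length : Int) - 1 - i) = (((cs.length - 1 - i : Nat) : Int)) by omega,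
        PySem.List.pyGet?_natCast, List.getElem?_eq_getElem hi, List.getElem?_eq_getElem hj] at h2
      rw [List.getD_eq_getElem _ _ hi, List.getD_eq_getElem _ _ hj]
      exact Option.some_injective _ h2
    simp only [hne, dite_false]
  | succ m ih =>
    intro i hm hik hmatch
    by_cases hi : i = k0
    · subst hi
      exact ih i (by omega) (le_refl _) hmatch
    · have hilt : i < k0 := by omega
      rw [scanB]
      have hg : (i : Int) < (cs.length : Int) - 1 - i ∧
          PySem.List.pyGet? cs (i : Int) = PySem.List.pyGet? cs ((cs.length : Int) - 1 - i) := by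
        refine ⟨by omega, ?_⟩
        have hiL : i < cs.length := by omega
        have hjL : cs.length - 1 - i < cs.length := by omega
        have heq := hmatch i (le_refl _) hilt
        rw [List.getD_eq_getElem _ _ hiL, List.getD_eq_getElem _ _ hjL] at heq
        rw [PySem.List.pyGet?_natCast,
          show ((cs.length : Int) - 1 - i) = (((cs.length - 1 - i : Nat) : Int)) by omega,
          PySem.List.pyGet?_natCast, List.getElem?_eq_getElem hiL, List.getElem?_eq_getElem hjL, heq]
      simp only [hg]
      have hrec : ((cs.length : Int) - 1 - i) - 1 = (cs.length : Int) - 1 - (i + 1 : Nat) := by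
        push_cast; ring
      rw [hrec]
      exact ih (i + 1) (by omega) (by omega) (fun k hk1 hk2 => hmatch k (by omega) hk2)

-- after repairing position k0 the string is a palindrome iff k0 was the only mismatch
theorem repaired_pal_iff (cs : List Char) (k0 : Nat) (hk0 : k0 < cs.length / 2)
    (hmis : cs.getD k0 'x' ≠ cs.getD (cs.length - 1 - k0) 'x') :
    ((cs.set k0 (cs.getD (cs.length - 1 - k0) 'x')).reverse
        = cs.set k0 (cs.getD (cs.length - 1 - k0) 'x')) ↔
      ∀ k < cs.length / 2, k ≠ k0 → cs.getD k 'x' = cs.getD (cs.length - 1 - k) 'x' := by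
  set v := cs.getD (cs.length - 1 - k0) 'x' with hv
  set t := cs.set k0 v with ht
  have hlen : t.length = cs.length := by simp [ht]
  have hget : ∀ k, k < cs.length → t.getD k 'x' = if k = k0 then v else cs.getD k 'x' := by
    intro k hk
    rw [List.getD_eq_getElem _ _ (by omega : k < t.length)]
    simp only [ht, List.getElem_set]
    by_cases h : k = k0
    · simp [h]
    · simp [h, Ne.symm h, List.getElem?_eq_getElem hk]
  rw [pal_iff, hlen]
  have hk0n : 2 * k0 + 2 ≤ cs.length := by omega
  constructor
  · intro h k hk hne
    have hkL : k < cs.length := by omega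
    have hjL : cs.length - 1 - k < cs.length := by omega
    have := h k hk
    rw [hget k hkL, hget _ hjL, if_neg hne, if_neg (by omega)] at this
    exact this
  · intro h k hk
    have hkL : k < cs.length := by omega
    have hjL : cs.length - 1 - k < cs.length := by omega
    rw [hget k hkL, hget _ hjL]
    by_cases hne : k = k0
    · subst hne
      rw [if_pos rfl, if_neg (by omega)]
    · rw [if_neg hne, if_neg (by omega)]
      exact h k hk hne

theorem cnt_one_iff (cs : List Char) (k0 : Nat) (hk0 : k0 < cs.length / 2)
    (hmis : cs.getD k0 'x' ≠ cs.getD (cs.length - 1 - k0) 'x') :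
    cnt cs = 1 ↔ ∀ k < cs.length / 2, k ≠ k0 → cs.getD k 'x' = cs.getD (cs.length - 1 - k) 'x' := by
  rw [cnt, List.countP_eq_length_filter]
  set p : Nat → Bool := fun k => cs.getD k 'x' != cs.getD (cs.length - 1 - k) 'x' with hp
  set l := (List.range (cs.length / 2)).filter p with hl
  have hmem : k0 ∈ l := by
    rw [hl, List.mem_filter]
    exact ⟨List.mem_range.2 hk0, by simpa [hp, bne] using hmis⟩
  have hnd : l.Nodup := List.Nodup.filter _ (List.nodup_range)
  constructor
  · intro hlen k hk hne
    obtain ⟨x, hx⟩ := List.length_eq_one_iff.1 hlen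
    rw [hx, List.mem_singleton] at hmem
    subst hmem
    by_contra hkm
    have : k ∈ l := by
      rw [hl, List.mem_filter]
      exact ⟨List.mem_range.2 hk, by simpa [hp, bne] using hkm⟩
    rw [hx, List.mem_singleton] at this
    exact hne this
  · intro h
    have hsub : l ⊆ [k0] := by
      intro x hx
      rw [hl, List.mem_filter] at hx
      obtain ⟨hx1, hx2⟩ := hx
      by_contra hxc
      have hxne : x ≠ k0 := by simpa using hxc
      have hthis := h x (List.mem_range.1 hx1) hxne
      simp only [hp, bne_iff_ne, ne_eq] at hx2
      rw [List.getD_eq_getElem?_getD, List.getD_eq_getElem?_getD] at hthis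
      exact hx2 hthis
    have hle : l.length ≤ 1 := by
      have := (List.subperm_of_subset hnd hsub).length_le
      simpa using this
    have hge : 1 ≤ l.length := List.length_pos_of_mem hmem
    omega

theorem solveB_char (s : String) :
    solve_alt s = (if (s.toList).reverse = s.toList
               then decide ((s.toList).length % 2 = 1) else decide (cnt (s.toList) = 1)) := by
  unfold solve_alt
  set cs := s.toList with hcs
  by_cases hpal : cs.reverse = cs
  · have hall := (pal_iff cs).1 hpal
    have h0 : (cs.length : Int) - 1 - (0 : Nat) = (cs.length : Int) - 1 := by push_cast; ring
    have hge := scan_all cs cs.length 0 (by omega) (fun k _ hk => hall k hk)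
    rw [h0] at hge
    simp only [hpal, ge_iff_le, hge, ite_true]
    rw [Bool.eq_iff_iff]; simp
  · have hex : ∃ k, k < cs.length / 2 ∧ cs.getD k 'x' ≠ cs.getD (cs.length - 1 - k) 'x' := by
      by_contra hc
      push Not at hc
      exact hpal ((pal_iff cs).2 hc)
    have hexd : ∃ k, (k < cs.length / 2 ∧ cs.getD k 'x' ≠ cs.getD (cs.length - 1 - k) 'x') := hex
    set k0 := Nat.find hexd with hk0def
    obtain ⟨hk0lt, hk0mis⟩ := Nat.find_spec hexd
    have hmin : ∀ k, k < k0 → ¬(k < cs.length / 2 ∧ cs.getD k 'x' ≠ cs.getD (cs.length - 1 - k) 'x') :=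
      fun k hk => Nat.find_min hexd hk
    have hmatch : ∀ k, 0 ≤ k → k < k0 → cs.getD k 'x' = cs.getD (cs.length - 1 - k) 'x' := by
      intro k _ hk
      by_contra hc
      exact hmin k hk ⟨by omega, hc⟩
    have h0 : (cs.length : Int) - 1 - ((0 : Nat) : Int) = (cs.length : Int) - 1 := by push_cast; ring
    have hscan := scan_first cs k0 hk0lt hk0mis k0 0 (by omega) (by omega) hmatch
    rw [h0] at hscan
    simp only [hscan]
    have hn : 2 * k0 + 2 ≤ cs.length := by omega
    have hlt : ¬ ((k0 : Int) ≥ (cs.length : Int) - 1 - (k0 : Nat)) := by omega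
    rw [if_neg hlt, if_neg hpal]
    have htoNat : ((cs.length : Int) - 1 - (k0 : Nat)).toNat = cs.length - 1 - k0 := by omega
    rw [htoNat, Bool.eq_iff_iff, beq_iff_eq, decide_eq_true_iff]
    constructor
    · intro h
      exact (cnt_one_iff cs k0 hk0lt hk0mis).2 ((repaired_pal_iff cs k0 hk0lt hk0mis).1 h.symm)
    · intro h
      exact ((repaired_pal_iff cs k0 hk0lt hk0mis).2 ((cnt_one_iff cs k0 hk0lt hk0mis).1 h)).symm

-- ===== VERDICT (by name: the statement is the Claim_ definition above) =====
theorem solve_spec : Claim_equal_solve := by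
  intro s _
  unfold Spec_solve
  rw [solveA_char, solveB_char]
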